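-- pv_equiv track=rewrite | github.com/Mariothe/geradordearquivos | app.py | validar_txt
-- ===== SOURCE A (Python) =====
-- def validar_txt(linhas):
--
--     erros = []
--
--     if not linhas[0].startswith("Dirf|"):
--         erros.append("Registro Dirf ausente.")
--
--     if not any(l.startswith("IDREC|") for l in linhas):
--         erros.append("Registro IDREC ausente.")
--
--     bpfdec = sum(1 for l in linhas if l.startswith("BPFDEC|"))
--     rtrt = sum(1 for l in linhas if l.startswith("RTRT|"))
--
--     if bpfdec != rtrt:
--         erros.append("Quantidade de BPFDEC diferente de RTRT.")
--
--     if not linhas[-1].startswith("FIMDirf|"):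
--         erros.append("Registro FIMDirf ausente.")
--
--     return erros
-- ===== SOURCE B (Python) =====
-- def validar_txt(linhas):
--     # One pass: IDREC presence flag and the BPFDEC-minus-RTRT balance.
--     found, diff = False, 0
--     for l in linhas:
--         if l.startswith("IDREC|"):
--             found = True
--         elif l.startswith("BPFDEC|"):
--             diff += 1
--         elif l.startswith("RTRT|"):
--             diff -= 1
--     checks = [
--         (linhas[0].startswith("Dirf|"), "Registro Dirf ausente."),
--         (found, "Registro IDREC ausente."),
--         (diff == 0, "Quantidade de BPFDEC diferente de RTRT."),
--         (linhas[-1].startswith("FIMDirf|"), "Registro FIMDirf ausente."),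
--     ]
--     return [msg for ok, msg in checks if not ok]
-- ===== Notes on version B (the rewrite author's own statement) =====
-- stated objective: alternative
-- what changed: Replaces A's three separate scans and sequential conditional appends with one accumulating pass keeping an IDREC flag and a single BPFDEC-minus-RTRT balance counter, then emits the errors table-driven by filtering a checks list.
import Mathlib
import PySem

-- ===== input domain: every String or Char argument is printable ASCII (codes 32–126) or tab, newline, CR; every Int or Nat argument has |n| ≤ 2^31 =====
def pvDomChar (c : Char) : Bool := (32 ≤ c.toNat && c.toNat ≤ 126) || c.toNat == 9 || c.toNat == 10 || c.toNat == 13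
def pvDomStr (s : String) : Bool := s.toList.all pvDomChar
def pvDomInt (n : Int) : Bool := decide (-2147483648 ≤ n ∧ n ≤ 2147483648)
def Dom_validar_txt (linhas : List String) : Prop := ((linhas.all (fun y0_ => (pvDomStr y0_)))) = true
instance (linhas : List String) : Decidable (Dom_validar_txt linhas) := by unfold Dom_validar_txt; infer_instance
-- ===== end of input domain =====

-- B replaces A's three scans and sequential appends by one recursive scan (IDREC flag + BPFDEC−RTRT balance) and a table-driven error filter; return-value equivalence only.

-- ===== PORT A =====
-- counting helpers for A's `sum(1 for l in linhas if l.startswith(...))`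
def countBpfdec (acc : Int) (l : String) : Int :=
  if PySem.Str.startswith l "BPFDEC|" then acc + 1 else acc

def countRtrt (acc : Int) (l : String) : Int :=
  if PySem.Str.startswith l "RTRT|" then acc + 1 else acc

def validar_txt (linhas : List String) : List String :=
  let erros : List String := []
  let erros := if !PySem.Str.startswith ((PySem.List.pyGet? linhas 0).getD "") "Dirf|" then
    erros ++ ["Registro Dirf ausente."] else erros
  let erros := if !(linhas.any (fun l => PySem.Str.startswith l "IDREC|")) then
    erros ++ ["Registro IDREC ausente."] else erros
  let bpfdec := linhas.foldl countBpfdec 0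
  let rtrt := linhas.foldl countRtrt 0
  let erros := if bpfdec ≠ rtrt then erros ++ ["Quantidade de BPFDEC diferente de RTRT."] else erros
  let erros := if !PySem.Str.startswith ((PySem.List.pyGet? linhas (-1)).getD "") "FIMDirf|" then
    erros ++ ["Registro FIMDirf ausente."] else erros
  erros

-- ===== PORT B =====
-- B's single pass: (found, diff) accumulator, diff = BPFDEC count minus RTRT count
def scanStep (fd : Bool × Int) (l : String) : Bool × Int :=
  if PySem.Str.startswith l "IDREC|" then (true, fd.2)
  else if PySem.Str.startswith l "BPFDEC|" then (fd.1, fd.2 + 1)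
  else if PySem.Str.startswith l "RTRT|" then (fd.1, fd.2 - 1)
  else fd

def validar_txt_alt (linhas : List String) : List String :=
  let fd := linhas.foldl scanStep (false, 0)
  let checks : List (Bool × String) :=
    [(PySem.Str.startswith ((PySem.List.pyGet? linhas 0).getD "") "Dirf|", "Registro Dirf ausente."),
     (fd.1, "Registro IDREC ausente."),
     (fd.2 == 0, "Quantidade de BPFDEC diferente de RTRT."),
     (PySem.Str.startswith ((PySem.List.pyGet? linhas (-1)).getD "") "FIMDirf|", "Registro FIMDirf ausente.")]
  (checks.filter (fun c => !c.1)).map (fun c => c.2)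

-- ===== PRECONDITION & SPEC =====
-- Pre_ excludes only the empty list, on which A raises IndexError at linhas[0] (B raises there too).
def Pre_validar_txt (linhas : List String) : Prop := linhas ≠ []
instance (linhas : List String) : Decidable (Pre_validar_txt linhas) := by unfold Pre_validar_txt; infer_instance

def pvWitness_validar_txt : List String := ["Dirf|x", "IDREC|1", "FIMDirf|"]

def Spec_validar_txt (linhas : List String) (out : List String) : Prop := out = validar_txt_alt linhas
instance (linhas : List String) (out : List String) : Decidable (Spec_validar_txt linhas out) := by unfold Spec_validar_txt; infer_instance

-- ===== CLAIM (what is proved, stated in full; the proofs are below) =====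
def Claim_equal_validar_txt : Prop := ∀ (linhas : List String), Dom_validar_txt linhas → Pre_validar_txt linhas → Spec_validar_txt linhas (validar_txt linhas)

-- ===== LEMMAS AND PROOFS =====

-- two nonempty prefixes of the same string with different first characters cannot both match
theorem sw_excl {s p q : String} {a b : Char}
    (hp : p.toList.head? = some a) (hq : q.toList.head? = some b) (hab : a ≠ b)
    (h : PySem.Str.startswith s p = true) : PySem.Str.startswith s q = false := by
  by_contra hq'
  rw [Bool.not_eq_false] at hq'
  simp only [PySem.Str.startswith_eq, PySem.Chars.startswith_iff] at h hq'
  obtain ⟨t1, ht1⟩ := h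
  obtain ⟨t2, ht2⟩ := hq'
  have h1 : s.toList.head? = some a := by
    rw [← ht1, List.head?_append_of_ne_nil]
    · exact hp
    · intro hnil; simp [hnil] at hp
  have h2 : s.toList.head? = some b := by
    rw [← ht2, List.head?_append_of_ne_nil]
    · exact hq
    · intro hnil; simp [hnil] at hq
  rw [h1] at h2
  exact hab (Option.some.injEq .. ▸ h2)

theorem foldl_count_shift (f : Int → String → Int)
    (hf : ∀ a l, f a l = a + f 0 l) (linhas : List String) (x : Int) :
    linhas.foldl f x = x + linhas.foldl f 0 := by
  induction linhas generalizing x with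
  | nil => simp
  | cons h t ih =>
    simp only [List.foldl_cons]
    rw [ih (f x h), ih (f 0 h), hf x h]
    ring

theorem scanStep_eq (linhas : List String) (b0 : Bool) (d0 : Int) :
    linhas.foldl scanStep (b0, d0) =
      (b0 || linhas.any (fun l => PySem.Str.startswith l "IDREC|"),
       d0 + linhas.foldl countBpfdec 0 - linhas.foldl countRtrt 0) := by
  induction linhas generalizing b0 d0 with
  | nil => simp
  | cons h t ih =>
    have hb : ∀ (a : Int) l, countBpfdec a l = a + countBpfdec 0 l := by
      intro a l; unfold countBpfdec; split_ifs <;> ring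
    have hr : ∀ (a : Int) l, countRtrt a l = a + countRtrt 0 l := by
      intro a l; unfold countRtrt; split_ifs <;> ring
    simp only [List.foldl_cons, List.any_cons, ih,
      foldl_count_shift countBpfdec hb t (countBpfdec 0 h),
      foldl_count_shift countRtrt hr t (countRtrt 0 h)]
    by_cases h1 : PySem.Chars.startswith h.toList ['I', 'D', 'R', 'E', 'C', '|'] = true
    · have h2 : PySem.Chars.startswith h.toList ['B', 'P', 'F', 'D', 'E', 'C', '|'] = false := by
        have := sw_excl (s := h) (p := "IDREC|") (q := "BPFDEC|") (a := 'I') (b := 'B')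
          rfl rfl (by decide) (by simpa using h1)
        simpa using this
      have h3 : PySem.Chars.startswith h.toList ['R', 'T', 'R', 'T', '|'] = false := by
        have := sw_excl (s := h) (p := "IDREC|") (q := "RTRT|") (a := 'I') (b := 'R')
          rfl rfl (by decide) (by simpa using h1)
        simpa using this
      simp [scanStep, countBpfdec, countRtrt, h1, h2, h3]
    · by_cases h2 : PySem.Chars.startswith h.toList ['B', 'P', 'F', 'D', 'E', 'C', '|'] = true
      · have h3 : PySem.Chars.startswith h.toList ['R', 'T', 'R', 'T', '|'] = false := by
          have := sw_excl (s := h) (p := "BPFDEC|") (q := "RTRT|") (a := 'B') (b := 'R')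
            rfl rfl (by decide) (by simpa using h2)
          simpa using this
        simp [scanStep, countBpfdec, countRtrt, h1, h2, h3]
        try ring
      · by_cases h3 : PySem.Chars.startswith h.toList ['R', 'T', 'R', 'T', '|'] = true
        · simp [scanStep, countBpfdec, countRtrt, h1, h2, h3]
          try ring
        · simp [scanStep, countBpfdec, countRtrt, h1, h2, h3]

-- ===== VERDICT (by name: the statement is the Claim_ definition above) =====
theorem validar_txt_spec : Claim_equal_validar_txt := by
  intro linhas _ _
  unfold Spec_validar_txt validar_txt validar_txt_alt
  rw [scanStep_eq]
  simp only [Bool.false_or, zero_add]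
  generalize PySem.Str.startswith ((PySem.List.pyGet? linhas 0).getD "") "Dirf|" = d
  generalize PySem.Str.startswith ((PySem.List.pyGet? linhas (-1)).getD "") "FIMDirf|" = f
  generalize linhas.any (fun l => PySem.Str.startswith l "IDREC|") = a
  generalize linhas.foldl countBpfdec 0 = b
  generalize linhas.foldl countRtrt 0 = r
  by_cases h : b = r
  · cases d <;> cases a <;> cases f <;> simp [List.filter, h]
  · have hd : (b - r == 0) = false := by simp [sub_eq_zero, h]
    cases d <;> cases a <;> cases f <;> simp [List.filter, h, hd]
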